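-- pv_equiv track=rewrite | github.com/sodlfmag/Baekjoon_Hub | 프로그래머스/lv1/68935. 3진법 뒤집기/3진법 뒤집기.py | solution
-- ===== SOURCE A (Python) =====
-- def solution(n):
--     arr = []
--     cnt = 1
--     while(n//(3**cnt) > 0):
--         cnt += 1
--
--     for i in reversed(range(cnt)):
--         arr.append(n//(3**i))
--         n %= 3**i
--     result = 0
--
--     for i in range(len(arr)):
--         result += arr[i] * (3**i)
--
--     return result
-- ===== SOURCE B (Python) =====
-- def solution(n):
--     digits = []
--     while n > 0:
--         digits.append(n % 3)
--         n //= 3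
--     result = 0
--     for d in digits:
--         result = result * 3 + d
--     return result
-- ===== Notes on version B (the rewrite author's own statement) =====
-- stated objective: simpler
-- what changed: B extracts base-3 digits least-significant-first in one while-loop and rebuilds the reversed value with a Horner fold, eliminating A's digit-count probing loop, the 3**i power computations, and the MSB-first extraction with an index-sum pass.
-- outside the precondition, e.g. on solution(-5): A returns -5, B returns 0
import Mathlib
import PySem

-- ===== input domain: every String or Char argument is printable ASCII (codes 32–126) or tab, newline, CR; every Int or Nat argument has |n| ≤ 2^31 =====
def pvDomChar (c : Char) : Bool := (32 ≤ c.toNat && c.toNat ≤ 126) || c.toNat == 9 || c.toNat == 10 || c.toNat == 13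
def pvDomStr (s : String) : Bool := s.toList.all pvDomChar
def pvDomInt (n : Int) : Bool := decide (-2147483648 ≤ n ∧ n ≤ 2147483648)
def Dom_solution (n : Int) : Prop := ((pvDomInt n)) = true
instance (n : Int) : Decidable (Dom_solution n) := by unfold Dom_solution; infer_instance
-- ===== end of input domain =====

-- B extracts base-3 digits LSB-first and rebuilds the reversed value with a Horner fold,
-- replacing A's digit-count probing loop, 3**i power table and MSB-first extraction (simpler).


-- ===== PORT A =====
-- while (n // 3**cnt) > 0: cnt += 1   (cnt starts at 1; it is a nonnegative loop counter)
def solutionCnt (n : Int) (cnt : Nat) : Nat :=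
  if PySem.Int.floordiv n ((3 : Int) ^ cnt) > 0 then solutionCnt n (cnt + 1) else cnt
termination_by n.toNat + 1 - 3 ^ cnt
decreasing_by
  rename_i h
  have h1 : (1 : Int) * (3 : Int) ^ cnt ≤ n := by
    rw [← PySem.Int.le_floordiv_iff_mul_le (by positivity)]; omega
  have h2 : ((3 ^ cnt : Nat) : Int) ≤ n := by push_cast; linarith
  have h3 : 3 ^ cnt ≤ n.toNat := by omega
  have h4 : 3 ^ cnt < 3 ^ (cnt + 1) :=
    Nat.pow_lt_pow_right (by norm_num) (Nat.lt_succ_self cnt)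
  omega

def solution (n : Int) : Int :=
  let cnt := solutionCnt n 1
  -- for i in reversed(range(cnt)): arr.append(n // 3**i); n %= 3**i
  -- (i ranges over nonnegative ints only, so 3**i is ported as 3 ^ i.toNat — exact here)
  let st := ((PySem.List.pyRange 0 (cnt : Int) 1).reverse).foldl
    (fun (st : List Int × Int) i =>
      (st.1 ++ [PySem.Int.floordiv st.2 ((3 : Int) ^ i.toNat)],
       PySem.Int.mod st.2 ((3 : Int) ^ i.toNat)))
    ([], n)
  -- for i in range(len(arr)): result += arr[i] * 3**i
  (PySem.List.pyRange 0 (st.1.length : Int) 1).foldl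
    (fun r i => r + PySem.List.pyGetD st.1 i 0 * (3 : Int) ^ i.toNat) 0

-- ===== PORT B =====
-- while n > 0: digits.append(n % 3); n //= 3
def altDigits (n : Int) : List Int :=
  if n > 0 then PySem.Int.mod n 3 :: altDigits (PySem.Int.floordiv n 3) else []
termination_by n.toNat
decreasing_by
  rename_i h
  have : PySem.Int.floordiv n 3 = n / 3 := PySem.Int.floordiv_eq_ediv_of_pos (by norm_num)
  rw [this]; omega

-- result = 0; for d in digits: result = result * 3 + d
def solution_alt (n : Int) : Int :=
  (altDigits n).foldl (fun r d => r * 3 + d) 0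

-- ===== PRECONDITION & SPEC =====
-- Pre_ restricts to the problem's natural domain of nonnegative n; on negative n
-- A's return of n itself is an artifact of floor division (B returns 0 there).
def Pre_solution (n : Int) : Prop := 0 ≤ n
instance (n : Int) : Decidable (Pre_solution n) := by unfold Pre_solution; infer_instance
def pvWitness_solution : Int := 45

def Spec_solution (n : Int) (out : Int) : Prop := out = solution_alt n
instance (n : Int) (out : Int) : Decidable (Spec_solution n out) := by unfold Spec_solution; infer_instance

-- ===== CLAIM (what is proved, stated in full; the proofs are below) =====
def Claim_equal_solution : Prop := ∀ (n : Int), Dom_solution n → Pre_solution n → Spec_solution n (solution n)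

-- ===== LEMMAS AND PROOFS =====

-- base-3 digits of a natural number, least significant first
def digitsN (m : Nat) : List Nat :=
  if m = 0 then [] else m % 3 :: digitsN (m / 3)
decreasing_by exact Nat.div_lt_self (by omega) (by norm_num)

-- value of the reversed base-3 representation of m, using the first c digits
def revN (c : Nat) (m : Nat) : Nat :=
  match c with
  | 0 => 0
  | c + 1 => m % 3 * 3 ^ c + revN c (m / 3)

-- A's MSB-first digit extraction (c digits of m, most significant first)
def extractN (c : Nat) (m : Nat) : List Nat :=
  match c with
  | 0 => []
  | c + 1 => m / 3 ^ c :: extractN c (m % 3 ^ c)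

-- LSB-first value of a digit list (what A's final summation loop computes)
def valI : List Int → Int
  | [] => 0
  | d :: t => d + 3 * valI t

theorem revN_msb (c : Nat) : ∀ m : Nat, m < 3 ^ (c + 1) →
    revN (c + 1) m = m / 3 ^ c + 3 * revN c (m % 3 ^ c) := by
  induction c with
  | zero => intro m hm; simp [revN]; omega
  | succ c ih =>
    intro m hm
    have hdiv : m / 3 < 3 ^ (c + 1) := by
      rw [Nat.div_lt_iff_lt_mul (by norm_num)]
      calc m < 3 ^ (c + 1 + 1) := hm
        _ = 3 ^ (c + 1) * 3 := by ring
    have h1 : revN (c + 2) m = m % 3 * 3 ^ (c+1) + revN (c+1) (m / 3) := rfl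
    rw [h1, ih (m / 3) hdiv]
    have e1 : m / 3 / 3 ^ c = m / 3 ^ (c + 1) := by
      rw [Nat.div_div_eq_div_mul, ← pow_succ']
    have e2 : m / 3 % 3 ^ c = m % 3 ^ (c+1) / 3 := by
      have := (Nat.mod_mul_right_div_self m 3 (3 ^ c)).symm
      rw [this, ← pow_succ']
    have e3 : m % 3 ^ (c+1) % 3 = m % 3 := Nat.mod_mod_of_dvd m ⟨3^c, by ring⟩
    have h2 : revN (c + 1) (m % 3 ^ (c+1)) = m % 3 ^ (c+1) % 3 * 3 ^ c + revN c (m % 3 ^ (c+1) / 3) := rfl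
    rw [e1, e2, h2, e3]
    have : m % 3 * 3 ^ (c + 1) = 3 * (m % 3 * 3 ^ c) := by ring
    omega

theorem valI_extract (c : Nat) : ∀ m : Nat, m < 3 ^ c →
    valI ((extractN c m).map (fun d => Int.ofNat d)) = (revN c m : Int) := by
  induction c with
  | zero => intro m hm; simp [extractN, valI, revN]
  | succ c ih =>
    intro m hm
    have hmod : m % 3 ^ c < 3 ^ c := Nat.mod_lt _ (by positivity)
    have hx : extractN (c+1) m = m / 3 ^ c :: extractN c (m % 3 ^ c) := rfl
    rw [hx, List.map_cons]
    have hv : valI (Int.ofNat (m / 3 ^ c) :: (extractN c (m % 3 ^ c)).map (fun d => Int.ofNat d))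
        = Int.ofNat (m / 3 ^ c) + 3 * valI ((extractN c (m % 3 ^ c)).map (fun d => Int.ofNat d)) := rfl
    rw [hv, ih _ hmod, revN_msb c m hm]
    simp only [Int.ofNat_eq_natCast]
    push_cast; ring

theorem horner_digits (m : Nat) : ∀ a : Int,
    ((digitsN m).map (fun d => Int.ofNat d)).foldl (fun r d => r * 3 + d) a
      = a * 3 ^ (digitsN m).length + (revN (digitsN m).length m : Int) := by
  induction m using Nat.strong_induction_on with
  | _ m ih =>
    intro a
    by_cases h0 : m = 0
    · subst h0; simp [digitsN, revN]
    · rw [digitsN]; simp only [h0, if_false]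
      have hdiv : m / 3 < m := Nat.div_lt_self (by omega) (by norm_num)
      simp only [List.map_cons, List.foldl_cons, List.length_cons, ih (m / 3) hdiv]
      have : revN ((digitsN (m/3)).length + 1) m
          = m % 3 * 3 ^ (digitsN (m/3)).length + revN (digitsN (m/3)).length (m / 3) := rfl
      rw [this]
      simp only [Int.ofNat_eq_natCast]
      push_cast; ring

theorem digitsN_bounds (m : Nat) (hm : 1 ≤ m) :
    3 ^ ((digitsN m).length - 1) ≤ m ∧ m < 3 ^ (digitsN m).length ∧ 1 ≤ (digitsN m).length := by
  induction m using Nat.strong_induction_on with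
  | _ m ih =>
    rw [digitsN, if_neg (Nat.one_le_iff_ne_zero.mp hm)]
    by_cases h3 : m / 3 = 0
    · have : m < 3 := by omega
      simp [digitsN, h3]
      omega
    · have hdiv : m / 3 < m := Nat.div_lt_self (by omega) (by norm_num)
      obtain ⟨b1, b2, b3⟩ := ih (m / 3) hdiv (by omega)
      set L := (digitsN (m/3)).length with hL
      simp only [List.length_cons]
      refine ⟨?_, ?_, by omega⟩
      · calc 3 ^ (L + 1 - 1) = 3 ^ (L - 1) * 3 := by rw [← pow_succ]; congr 1; omega
          _ ≤ (m / 3) * 3 := Nat.mul_le_mul_right 3 b1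
          _ ≤ m := Nat.div_mul_le_self m 3
      · calc m < (m / 3 + 1) * 3 := by omega
          _ ≤ 3 ^ L * 3 := Nat.mul_le_mul_right 3 (by omega)
          _ = 3 ^ (L + 1) := by rw [pow_succ]

theorem altDigits_eq (m : Nat) : altDigits (m : Int) = (digitsN m).map (fun d => Int.ofNat d) := by
  induction m using Nat.strong_induction_on with
  | _ m ih =>
    rw [altDigits, digitsN]
    by_cases h0 : m = 0
    · simp [h0]
    · rw [if_pos (by exact_mod_cast Nat.pos_of_ne_zero h0), if_neg h0]
      have hfd : PySem.Int.floordiv (m : Int) 3 = ((m / 3 : Nat) : Int) := by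
        exact_mod_cast PySem.Int.floordiv_natCast m 3
      have hmd : PySem.Int.mod (m : Int) 3 = ((m % 3 : Nat) : Int) := by
        exact_mod_cast PySem.Int.mod_natCast m 3
      rw [hfd, hmd, ih (m / 3) (Nat.div_lt_self (by omega) (by norm_num))]
      simp

theorem solutionCnt_eq_digitsLen (m : Nat) (hm : 1 ≤ m) :
    ∀ c : Nat, 1 ≤ c → 3 ^ (c - 1) ≤ m →
    solutionCnt (m : Int) c = (digitsN m).length := by
  obtain ⟨b1, b2, b3⟩ := digitsN_bounds m hm
  set L := (digitsN m).length with hL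
  have key : ∀ k c, 1 ≤ c → 3 ^ (c - 1) ≤ m → L - c = k → solutionCnt (m : Int) c = L := by
    intro k
    induction k with
    | zero =>
      intro c hc1 hc2 hk
      have hcle : c ≤ L := by
        have : 3 ^ (c - 1) < 3 ^ L := lt_of_le_of_lt hc2 b2
        have := (Nat.pow_lt_pow_iff_right (by norm_num : 1 < 3)).mp this
        omega
      have hcL : c = L := by omega
      rw [solutionCnt]
      have hfd : PySem.Int.floordiv (m : Int) ((3:Int) ^ c) = ((m / 3 ^ c : Nat) : Int) := by
        have := PySem.Int.floordiv_natCast m (3 ^ c); push_cast at this ⊢; exact this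
      rw [if_neg]
      · exact hcL
      · rw [hfd]
        have : m / 3 ^ c = 0 := Nat.div_eq_of_lt (by rw [hcL]; exact b2)
        simp [this]
    | succ k ihk =>
      intro c hc1 hc2 hk
      have hclt : c < L := by omega
      have hle : 3 ^ c ≤ m := le_trans (Nat.pow_le_pow_right (by norm_num) (by omega : c ≤ L - 1)) b1
      rw [solutionCnt]
      have hfd : PySem.Int.floordiv (m : Int) ((3:Int) ^ c) = ((m / 3 ^ c : Nat) : Int) := by
        have := PySem.Int.floordiv_natCast m (3 ^ c); push_cast at this ⊢; exact this
      rw [if_pos]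
      · exact ihk (c + 1) (by omega) (by simpa using hle) (by omega)
      · rw [hfd]
        have : 1 ≤ m / 3 ^ c := (Nat.le_div_iff_mul_le (by positivity)).mpr (by omega)
        exact_mod_cast this
  intro c hc1 hc2
  exact key (L - c) c hc1 hc2 rfl

theorem extract_loop (c : Nat) : ∀ (m : Nat) (arr0 : List Int), ∃ r : Int,
    ((PySem.List.pyRange 0 (c : Int) 1).reverse).foldl
      (fun (st : List Int × Int) i =>
        (st.1 ++ [PySem.Int.floordiv st.2 ((3 : Int) ^ i.toNat)],
         PySem.Int.mod st.2 ((3 : Int) ^ i.toNat)))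
      (arr0, (m : Int))
    = (arr0 ++ (extractN c m).map (fun d => Int.ofNat d), r) := by
  induction c with
  | zero =>
    intro m arr0
    exact ⟨(m : Int), by simp [extractN]⟩
  | succ c ih =>
    intro m arr0
    have hsplit : PySem.List.pyRange 0 ((c + 1 : Nat) : Int) 1
        = PySem.List.pyRange 0 (c : Int) 1 ++ [(c : Int)] := by
      push_cast
      exact PySem.List.pyRange_one_succ_right (by exact_mod_cast Nat.zero_le c)
    rw [hsplit, List.reverse_append]
    simp only [List.reverse_singleton, List.singleton_append, List.foldl_cons]
    have htn : ((c : Int)).toNat = c := Int.toNat_natCast c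
    have hfd : PySem.Int.floordiv (m : Int) ((3:Int) ^ c) = ((m / 3 ^ c : Nat) : Int) := by
      have := PySem.Int.floordiv_natCast m (3 ^ c)
      push_cast at this ⊢; exact this
    have hmd : PySem.Int.mod (m : Int) ((3:Int) ^ c) = ((m % 3 ^ c : Nat) : Int) := by
      have := PySem.Int.mod_natCast m (3 ^ c)
      push_cast at this ⊢; exact this
    rw [htn, hfd, hmd]
    obtain ⟨r, hr⟩ := ih (m % 3 ^ c) (arr0 ++ [((m / 3 ^ c : Nat) : Int)])
    refine ⟨r, ?_⟩
    rw [hr]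
    simp [extractN]

theorem sum_loop_gen (ds : List Int) : ∀ (a w : Int),
    (List.range ds.length).foldl (fun r k => r + ds.getD k 0 * (w * (3:Int) ^ k)) a
      = a + w * valI ds := by
  induction ds with
  | nil => intro a w; simp [valI]
  | cons d t ih =>
    intro a w
    rw [List.length_cons, List.range_succ_eq_map, List.foldl_cons, List.foldl_map]
    simp only [List.getD_cons_zero, List.getD_cons_succ, pow_zero, mul_one]
    have heq : List.foldl (fun (r : Int) (k : Nat) => r + t.getD k 0 * (w * (3:Int) ^ (k + 1))) (a + d * w) (List.range t.length)
        = List.foldl (fun (r : Int) (k : Nat) => r + t.getD k 0 * ((w * 3) * (3:Int) ^ k)) (a + d * w) (List.range t.length) :=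
      PySem.List.foldl_congr_mem _ _ _ _ (by intro acc x hx; ring)
    rw [heq, ih]
    simp [valI]; ring

theorem sum_loop (ds : List Int) :
    (PySem.List.pyRange 0 (ds.length : Int) 1).foldl
      (fun r i => r + PySem.List.pyGetD ds i 0 * (3 : Int) ^ i.toNat) 0 = valI ds := by
  rw [PySem.List.pyRange_one]
  simp only [sub_zero, Int.toNat_natCast, List.foldl_map, zero_add]
  have heq : List.foldl (fun (x : Int) (y : Nat) => x + PySem.List.pyGetD ds (y : Int) 0 * (3:Int) ^ y) 0 (List.range ds.length)
      = List.foldl (fun (r : Int) (k : Nat) => r + ds.getD k 0 * (1 * (3:Int) ^ k)) 0 (List.range ds.length) :=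
    PySem.List.foldl_congr_mem _ _ _ _ (by
      intro acc x hx
      rw [PySem.List.pyGetD_natCast]; ring)
  rw [heq, sum_loop_gen]
  ring

theorem solution_eq_valI (m : Nat) (hcnt : solutionCnt (m : Int) 1 = (digitsN m).length)
    (hsz : m < 3 ^ (digitsN m).length) :
    solution (m : Int) = (revN (digitsN m).length m : Int) := by
  obtain ⟨r, hr⟩ := extract_loop (digitsN m).length m []
  simp only [solution, hcnt, hr, List.nil_append]
  rw [sum_loop, valI_extract _ m hsz]

theorem solution_alt_eq (m : Nat) :
    solution_alt (m : Int) = (revN (digitsN m).length m : Int) := by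
  rw [solution_alt, altDigits_eq m, horner_digits m 0]
  ring

-- ===== VERDICT (by name: the statement is the Claim_ definition above) =====
theorem solution_spec : Claim_equal_solution := by
  unfold Claim_equal_solution Spec_solution Pre_solution
  intro n _ hpre
  obtain ⟨m, rfl⟩ : ∃ m : Nat, n = (m : Int) := ⟨n.toNat, (Int.toNat_of_nonneg hpre).symm⟩
  by_cases h0 : m = 0
  · subst h0
    have hcnt : solutionCnt ((0 : Nat) : Int) 1 = 1 := by
      rw [solutionCnt, if_neg]
      have : PySem.Int.floordiv ((0:Nat) : Int) ((3:Int) ^ 1) = ((0 / 3 ^ 1 : Nat) : Int) := by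
        have := PySem.Int.floordiv_natCast 0 (3 ^ 1); push_cast at this ⊢; exact this
      rw [this]; simp
    obtain ⟨r, hr⟩ := extract_loop 1 0 []
    simp only [solution, hcnt, hr, List.nil_append]
    rw [sum_loop, valI_extract 1 0 (by norm_num)]
    rw [solution_alt, altDigits_eq 0]
    simp [digitsN, revN]
  · have hm1 : 1 ≤ m := by omega
    have hcnt := solutionCnt_eq_digitsLen m hm1 1 le_rfl (by simpa using hm1)
    obtain ⟨_, b2, _⟩ := digitsN_bounds m hm1
    rw [solution_eq_valI m hcnt b2, solution_alt_eq m]
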